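-- pv_equiv track=rewrite | github.com/ebby-s/ALevelCS | Python Challenges/ebbyA233.py | pascal_fib
-- ===== SOURCE A (Python) =====
-- def pascal_fib(original,order=None):
--     fib = 0
--     if order == None: order = original
--     if order == 1: line = [1]
--     else:
--         line = [1]
--         prev_line,fib = pascal_fib(original,order-1)
--         for i in range(len(prev_line)-1):
--             line.append(prev_line[i] + prev_line[i+1])
--         line += [1]
--     try: fib += line[original-order]
--     except: '''do nothing'''
--     return line,fib
-- ===== SOURCE B (Python) =====
-- def pascal_fib(original, order=None):
--     o = original if order is None else order
--     line = [1]
--     fib = 0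
--     for k in range(1, o + 1):
--         if k > 1:
--             line = [1] + [a + b for a, b in zip(line, line[1:])] + [1]
--         try:
--             fib += line[original - k]
--         except IndexError:
--             pass
--     return line, fib
-- ===== Notes on version B (the rewrite author's own statement) =====
-- stated objective: alternative
-- what changed: Replaces A's top-down recursion, which builds each Pascal row from the recursive result by an index loop over the previous row, with a bottom-up iterative loop that rebuilds the row in place via a zip-pairwise comprehension and accumulates the diagonal fib sum as it goes; Pre_ excludes effective order <= 0, on which A hits the recursion limit (RecursionError).
import Mathlib
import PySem

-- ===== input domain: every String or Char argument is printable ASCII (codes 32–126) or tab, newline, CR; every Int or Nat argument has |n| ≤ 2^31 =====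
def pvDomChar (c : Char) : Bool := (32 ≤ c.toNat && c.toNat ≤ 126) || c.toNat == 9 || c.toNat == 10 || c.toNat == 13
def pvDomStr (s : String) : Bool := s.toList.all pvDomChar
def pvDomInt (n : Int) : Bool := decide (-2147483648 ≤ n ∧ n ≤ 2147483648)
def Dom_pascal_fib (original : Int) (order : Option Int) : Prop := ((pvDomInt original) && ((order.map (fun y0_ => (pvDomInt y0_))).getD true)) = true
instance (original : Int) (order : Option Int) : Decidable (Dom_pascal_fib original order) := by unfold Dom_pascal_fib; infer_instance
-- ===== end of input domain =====

-- B replaces A's top-down recursion (each row built from the recursive result by an index loop)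
-- with a bottom-up iterative loop rebuilding the row via a zip-pairwise comprehension
-- (a different decomposition of similar cost).

-- ===== PORT A =====
-- shared tail of every return path:  try: fib += line[original-order]  except IndexError: pass
def pascalFibFinish (original order : Int) (lf : List Int × Int) : List Int × Int :=
  match PySem.List.pyGet? lf.1 (original - order) with
  | some v => (lf.1, lf.2 + v)
  | none => (lf.1, lf.2)

-- fuel = number of remaining recursive calls; the top level passes (ord-1).toNat, which is
-- exactly the recursion depth of the Python for ord ≥ 1 (Pre_); fuel 0 is only reached at order = 1.
def pascalFibGo (original : Int) : Nat → Int → List Int × Int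
  | 0, order => pascalFibFinish original order ([1], 0)
  | f + 1, order =>
      pascalFibFinish original order
        (if order = 1 then ([1], 0)
         else
           let p := pascalFibGo original f (order - 1)
           let prev := p.1
           let line :=
             (PySem.List.pyRange 0 ((prev.length : Int) - 1) 1).foldl
               (fun acc i => acc ++ [PySem.List.pyGetD prev i 0 + PySem.List.pyGetD prev (i + 1) 0])
               [1]
           (line ++ [1], p.2))

def pascal_fib (original : Int) (order : Option Int) : List Int × Int :=
  let ord := match order with | none => original | some o => o
  pascalFibGo original (ord - 1).toNat ord

-- ===== PORT B =====
-- the for-k loop body (state = (line, fib)):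
--   if k > 1: line = [1] + [a+b for a,b in zip(line, line[1:])] + [1]
--   try: fib += line[original-k]  except IndexError: pass
def pascalFibAltStep (original : Int) (s : List Int × Int) (k : Int) : List Int × Int :=
  let line :=
    if 1 < k then
      [1] ++ ((s.1.zip (PySem.List.slice s.1 (some 1) none)).map (fun p => p.1 + p.2)) ++ [1]
    else s.1
  match PySem.List.pyGet? line (original - k) with
  | some v => (line, s.2 + v)
  | none => (line, s.2)

def pascal_fib_alt (original : Int) (order : Option Int) : List Int × Int :=
  let o := match order with | none => original | some v => v
  (PySem.List.pyRange 1 (o + 1) 1).foldl (pascalFibAltStep original) ([1], 0)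

-- ===== PRECONDITION & SPEC =====
-- Pre_ excludes effective order ≤ 0, on which the Python A recurses without end (RecursionError).
def Pre_pascal_fib (original : Int) (order : Option Int) : Prop := 1 ≤ order.getD original
instance (original : Int) (order : Option Int) : Decidable (Pre_pascal_fib original order) := by
  unfold Pre_pascal_fib; infer_instance

def pvWitness_pascal_fib : Int × Option Int := (5, none)

def Spec_pascal_fib (original : Int) (order : Option Int) (out : List Int × Int) : Prop := out = pascal_fib_alt original order
instance (original : Int) (order : Option Int) (out : List Int × Int) : Decidable (Spec_pascal_fib original order out) := by unfold Spec_pascal_fib; infer_instance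

-- ===== CLAIM (what is proved, stated in full; the proofs are below) =====
def Claim_equal_pascal_fib : Prop := ∀ (original : Int) (order : Option Int), Dom_pascal_fib original order → Pre_pascal_fib original order → Spec_pascal_fib original order (pascal_fib original order)

-- ===== LEMMAS AND PROOFS =====

-- the Pascal row of order N+1: entries C(N, j), j = 0..N
def rowL (N : Nat) : List Int := (List.range (N + 1)).map (fun j => ((N.choose j : Nat) : Int))

-- contribution of level k to the fib accumulator
def contrib (original k : Int) : Int :=
  (PySem.List.pyGet? (rowL (k - 1).toNat) (original - k)).getD 0

def fibSum (original : Int) : Nat → Int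
  | 0 => 0
  | t + 1 => fibSum original t + contrib original ((t : Int) + 1)

theorem rowL_length (N : Nat) : (rowL N).length = N + 1 := by simp [rowL]

theorem rowL_zero : rowL 0 = [1] := by simp [rowL]

theorem rowL_succ (m : Nat) :
    rowL (m + 1) = [1] ++ (List.range m).map (fun j => ((m.choose j : Nat) : Int) + ((m.choose (j+1) : Nat) : Int)) ++ [1] := by
  unfold rowL
  rw [List.range_succ (n := m + 1), List.map_append, List.range_succ_eq_map, List.map_cons, List.map_map]
  simp [Nat.choose_succ_succ, Function.comp]

theorem rowL_getD (m j : Nat) (h : j < m + 1) : (rowL m).getD j 0 = ((m.choose j : Nat) : Int) := by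
  unfold rowL; rw [PySem.List.getD_map_range _ _ _ _ h]

theorem rowA_build (m : Nat) :
    ((PySem.List.pyRange 0 (((rowL m).length : Int) - 1) 1).foldl
        (fun acc i => acc ++ [PySem.List.pyGetD (rowL m) i 0 + PySem.List.pyGetD (rowL m) (i + 1) 0])
        [1]) ++ [1] = rowL (m + 1) := by
  have hb : (((rowL m).length : Int) - 1) = (m : Int) := by rw [rowL_length]; push_cast; ring
  rw [hb, PySem.List.foldl_append_singleton_eq_map, PySem.List.pyRange_zero_natCast, List.map_map,
      rowL_succ]
  congr 1
  congr 1
  apply List.map_congr_left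
  intro j hj
  have hj' : j < m := List.mem_range.mp hj
  have h1 : ((j : Int) + 1) = ((j + 1 : Nat) : Int) := by push_cast; ring
  simp only [Function.comp, PySem.List.pyGetD_natCast, h1]
  rw [rowL_getD m j (by omega), rowL_getD m (j+1) (by omega)]

theorem zip_row (m : Nat) :
    ((rowL m).zip (rowL m).tail).map (fun p => p.1 + p.2)
      = (List.range m).map (fun j => ((m.choose j : Nat) : Int) + ((m.choose (j+1) : Nat) : Int)) := by
  apply List.ext_getElem
  · simp [rowL]
  · intro j h1 h2
    have hj : j < m := by simpa [rowL] using h2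
    simp [rowL, List.getElem_zip, List.getElem_tail]

theorem rowB_build (m : Nat) :
    [1] ++ ((rowL m).zip (PySem.List.slice (rowL m) (some 1) none)).map (fun p => p.1 + p.2) ++ [1]
      = rowL (m + 1) := by
  rw [PySem.List.slice_from_one, zip_row, rowL_succ]

theorem finish_eq (original o : Int) (fb : Int) :
    pascalFibFinish original o (rowL (o-1).toNat, fb) = (rowL (o-1).toNat, fb + contrib original o) := by
  unfold pascalFibFinish contrib
  cases hg : PySem.List.pyGet? (rowL (o-1).toNat) (original - o) with
  | none => simp
  | some v => simp

theorem base_case (original : Int) (fuel : Nat) :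
    pascalFibGo original fuel 1 = (rowL 0, fibSum original 1) := by
  have h0 : rowL 0 = rowL ((1:Int) - 1).toNat := by norm_num
  have hf : fibSum original 1 = 0 + contrib original 1 := by
    show fibSum original 0 + contrib original ((0 : Nat) + 1 : Int) = _
    norm_num [fibSum]
  cases fuel with
  | zero =>
      rw [pascalFibGo, show ([1] : List Int) = rowL ((1:Int)-1).toNat by norm_num [rowL_zero],
          finish_eq, hf, ← h0]
  | succ f =>
      rw [pascalFibGo, if_pos rfl,
          show ([1] : List Int) = rowL ((1:Int)-1).toNat by norm_num [rowL_zero],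
          finish_eq, hf, ← h0]

theorem A_eq (original : Int) : ∀ (fuel : Nat) (o : Int), 1 ≤ o → (o - 1).toNat ≤ fuel →
    pascalFibGo original fuel o = (rowL (o - 1).toNat, fibSum original o.toNat) := by
  intro fuel
  induction fuel with
  | zero =>
      intro o ho hf
      have h1 : o = 1 := by omega
      subst h1
      simpa using base_case original 0
  | succ f ih =>
      intro o ho hf
      by_cases h1 : o = 1
      · subst h1; simpa using base_case original (f + 1)
      · have ho2 : 2 ≤ o := by omega
        have ihr := ih (o - 1) (by omega) (by omega)
        set m := (o - 2).toNat with hm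
        have hm1 : (o - 1 - 1).toNat = m := by omega
        have hm2 : (o - 1).toNat = m + 1 := by omega
        have hm3 : o.toNat = (m + 1) + 1 := by omega
        rw [hm1, hm2] at ihr
        rw [pascalFibGo, if_neg h1, ihr]
        show pascalFibFinish original o
            ((PySem.List.pyRange 0 (((rowL m).length : Int) - 1) 1).foldl
               (fun acc i => acc ++ [PySem.List.pyGetD (rowL m) i 0 + PySem.List.pyGetD (rowL m) (i + 1) 0])
               [1] ++ [1], fibSum original (m + 1)) = _
        rw [rowA_build m, show rowL (m+1) = rowL (o-1).toNat by rw [hm2], finish_eq, hm3]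
        rw [show fibSum original ((m+1)+1) = fibSum original (m+1) + contrib original ((m+1 : Nat) + 1 : Int) from rfl]
        norm_num
        rw [show ((m : Int) + 1 + 1) = o by omega]

-- B's loop body at level k ≥ 2, applied to the invariant state
theorem B_step (original k : Int) (hk : 2 ≤ k) (fb : Int) :
    pascalFibAltStep original (rowL (k - 2).toNat, fb) k
      = (rowL (k - 1).toNat, fb + contrib original k) := by
  unfold pascalFibAltStep
  have hline : ([1] ++ ((rowL (k - 2).toNat).zip
        (PySem.List.slice (rowL (k - 2).toNat) (some 1) none)).map (fun p => p.1 + p.2) ++ [1])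
      = rowL (k - 1).toNat := by
    rw [rowB_build]
    congr 1
    omega
  rw [if_pos (by omega : 1 < k), hline]
  simp only [contrib]
  cases hg : PySem.List.pyGet? (rowL (k-1).toNat) (original - k) with
  | none => simp
  | some v => simp

theorem B_step1 (original : Int) (fb : Int) :
    pascalFibAltStep original ([1], fb) 1 = (rowL 0, fb + contrib original 1) := by
  unfold pascalFibAltStep
  rw [if_neg (by omega : ¬ (1:Int) < 1)]
  have hre : rowL ((1:Int) - 1).toNat = ([1] : List Int) := by norm_num [rowL_zero]
  simp only [contrib, hre]
  cases hg : PySem.List.pyGet? ([1] : List Int) (original - 1) with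
  | none => simp [rowL_zero]
  | some v => simp [rowL_zero]

theorem B_loop (original : Int) : ∀ (t : Nat),
    (PySem.List.pyRange 1 (((t : Int) + 1) + 1) 1).foldl (pascalFibAltStep original) ([1], 0)
      = (rowL t, fibSum original (t + 1)) := by
  intro t
  induction t with
  | zero =>
      have h1 : PySem.List.pyRange 1 (((0 : Nat) : Int) + 1 + 1) 1 = [1] := by decide
      rw [h1, List.foldl_cons, List.foldl_nil, B_step1]
      have hf : fibSum original (0 + 1) = 0 + contrib original 1 := by
        show fibSum original 0 + contrib original (((0 : Nat) : Int) + 1) = _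
        norm_num [fibSum]
      rw [hf]
  | succ t ih =>
      have hc : (((t + 1 : Nat) : Int) + 1) + 1 = ((((t : Int) + 1) + 1) : Int) + 1 := by push_cast; ring
      rw [hc, PySem.List.pyRange_one_succ_right (by omega), List.foldl_append, ih,
          List.foldl_cons, List.foldl_nil]
      have hrow : rowL t = rowL ((((t : Int) + 1) + 1) - 2).toNat := by congr 1; omega
      rw [hrow, B_step original (((t : Int) + 1) + 1) (by omega)]
      have h2 : ((((t : Int) + 1) + 1) - 1).toNat = t + 1 := by omega
      have hf : fibSum original ((t+1)+1) = fibSum original (t+1) + contrib original (((t : Nat) : Int) + 1 + 1) := rfl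
      rw [h2, hf]

theorem B_eval (original o : Int) (ho : 1 ≤ o) :
    (PySem.List.pyRange 1 (o + 1) 1).foldl (pascalFibAltStep original) ([1], 0)
      = (rowL (o - 1).toNat, fibSum original o.toNat) := by
  have h := B_loop original (o.toNat - 1)
  have hc : (((o.toNat - 1 : Nat) : Int) + 1) + 1 = o + 1 := by omega
  have ht : o.toNat - 1 + 1 = o.toNat := by omega
  rw [hc, ht] at h
  rw [h]
  congr 2
  omega

-- ===== VERDICT (by name: the statement is the Claim_ definition above) =====
theorem pascal_fib_spec : Claim_equal_pascal_fib := by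
  intro original order _ hpre
  unfold Spec_pascal_fib
  cases order with
  | none =>
      have hpre' : 1 ≤ original := hpre
      have hA : pascal_fib original none = (rowL (original - 1).toNat, fibSum original original.toNat) :=
        A_eq original _ original hpre' le_rfl
      have hB : pascal_fib_alt original none = (rowL (original - 1).toNat, fibSum original original.toNat) :=
        B_eval original original hpre'
      rw [hA, hB]
  | some o =>
      have hpre' : 1 ≤ o := hpre
      have hA : pascal_fib original (some o) = (rowL (o - 1).toNat, fibSum original o.toNat) :=
        A_eq original _ o hpre' le_rfl
      have hB : pascal_fib_alt original (some o) = (rowL (o - 1).toNat, fibSum original o.toNat) :=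
        B_eval original o hpre'
      rw [hA, hB]
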